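-- pv_equiv track=rewrite | github.com/nawhgnawg/Algo | Programmers/Zero_BeakJoon/2_터치 미션.py | solution
-- ===== SOURCE A (Python) =====
-- from collections import deque
--
-- def bfs(n, arr):
--     dx = [0, 0, 1, -1]
--     dy = [1, -1, 0, 0]
--     q = deque()
--     dist = [[-1] * n for _ in range(n)]  # 아직 방문 안함 -> -1
--
--     for i in range(n):
--         for j in range(n):
--             if arr[i][j] == "P":
--                 q.append((i, j))
--                 dist[i][j] = 0
--
--     while q:
--         r, c = q.popleft()
--         for k in range(4):
--             nx = r + dx[k]
--             ny = c + dy[k]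
--             if 0 <= nx < n and 0 <= ny < n:
--                 if arr[nx][ny] != 'X':
--                     if dist[nx][ny] == -1:
--                         dist[nx][ny] = dist[r][c] + 1
--                         q.append((nx, ny))
--
--     max_num = -1
--     for i in range(n):
--         for j in range(n):
--             if arr[i][j] == 'O':
--                 if max_num < dist[i][j]:
--                     max_num = dist[i][j]
--     return max_num
--
-- def solution(n, board):
--     answer = -1
--     # 특정 타겟 제거
--     for i in range(n):
--         for j in range(n):
--             if board[i][j] == 'O':
--                 a = [[''] * n for _ in range(n)]
--                 for l1 in range(n):
--                     for l2 in range(n):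
--                         a[l1][l2] = board[l1][l2]
--                         if l1 == i and l2 == j:
--                             a[l1][l2] = 'B'
--                 cur = bfs(n, a)
--                 if cur != -1:
--                     if answer == -1 or answer > cur:
--                         answer = cur
--
--     # 벽 제거
--     for i in range(n):
--         for j in range(n):
--             if board[i][j] == 'X':
--                 a = [[''] * n for _ in range(n)]
--                 for l1 in range(n):
--                     for l2 in range(n):
--                         a[l1][l2] = board[l1][l2]
--                         if l1 == i and l2 == j:
--                             a[l1][l2] = 'B'
--
--                 cur = bfs(n, a)
--                 if cur != -1:
--                     if answer == -1 or answer > cur: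
--                         answer = cur
--
--     return answer
-- ===== SOURCE B (Python) =====
-- from collections import deque
--
-- def bfs_dist(n, arr):
--     dx = [0, 0, 1, -1]
--     dy = [1, -1, 0, 0]
--     q = deque()
--     dist = [[-1] * n for _ in range(n)]
--     for i in range(n):
--         for j in range(n):
--             if arr[i][j] == "P":
--                 q.append((i, j))
--                 dist[i][j] = 0
--     while q:
--         r, c = q.popleft()
--         for k in range(4):
--             nx = r + dx[k]
--             ny = c + dy[k]
--             if 0 <= nx < n and 0 <= ny < n and arr[nx][ny] != 'X' and dist[nx][ny] == -1:
--                 dist[nx][ny] = dist[r][c] + 1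
--                 q.append((nx, ny))
--     return dist
--
-- def solution(n, board):
--     # One BFS on the unmodified board: 'O' -> 'B' never changes passability,
--     # so every O-removal branch shares this same distance field.
--     dist = bfs_dist(n, board)
--     vals = [dist[i][j] for i in range(n) for j in range(n) if board[i][j] == 'O']
--     best = -1
--     if len(vals) >= 2:
--         # removing one O leaves max of the others: the minimum over all
--         # removals is the second-largest value (largest if the max repeats)
--         m1 = max(vals)
--         rest = list(vals)
--         rest.remove(m1)
--         m2 = max(rest)
--         best = m2 if m2 != -1 else m1
--     # wall removal still needs one BFS per wall
--     for i in range(n):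
--         for j in range(n):
--             if board[i][j] == 'X':
--                 a = [row[:] for row in board]
--                 a[i][j] = 'B'
--                 d = bfs_dist(n, a)
--                 cur = -1
--                 for r in range(n):
--                     for c in range(n):
--                         if a[r][c] == 'O':
--                             cur = max(cur, d[r][c])
--                 if cur != -1 and (best == -1 or best > cur):
--                     best = cur
--     return best
-- ===== Notes on version B (the rewrite author's own statement) =====
-- stated objective: alternative
-- what changed: A reruns a full multi-source BFS for every 'O' cell it removes; B runs that BFS once on the unmodified board (turning an O into B never changes passability) and derives the O-removal branch analytically as the second-largest O-distance (largest when the maximum repeats, none with fewer than two O cells), keeping one BFS per removed wall, so B performs #X+1 BFS runs to A's #X+#O.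
import Mathlib
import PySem

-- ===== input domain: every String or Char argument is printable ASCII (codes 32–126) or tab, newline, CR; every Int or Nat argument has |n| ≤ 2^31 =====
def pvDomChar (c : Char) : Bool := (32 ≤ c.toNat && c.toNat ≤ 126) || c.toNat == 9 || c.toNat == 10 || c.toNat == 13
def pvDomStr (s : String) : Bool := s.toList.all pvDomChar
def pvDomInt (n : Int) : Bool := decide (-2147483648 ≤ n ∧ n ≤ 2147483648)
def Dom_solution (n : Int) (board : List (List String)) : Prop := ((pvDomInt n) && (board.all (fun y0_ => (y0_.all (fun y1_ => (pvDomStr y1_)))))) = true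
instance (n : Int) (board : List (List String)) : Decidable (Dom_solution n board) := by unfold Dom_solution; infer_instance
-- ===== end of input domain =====

-- B replaces A's per-'O'-removal BFS re-runs by ONE multi-source BFS on the unmodified board
-- (an O→B edit never changes passability) plus a largest/second-largest analysis of the O
-- distances; the per-wall loop keeps one BFS per wall (#X+1 BFS runs to A's #X+#O).

-- ===== PORT A =====
def pvIdxS (g : List (List String)) (i j : Int) : String :=
  PySem.List.pyGetD (PySem.List.pyGetD g i []) j ""

def pvIdxI (g : List (List Int)) (i j : Int) : Int :=
  PySem.List.pyGetD (PySem.List.pyGetD g i []) j (-1)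

def pvSet2 (g : List (List Int)) (i j v : Int) : List (List Int) :=
  PySem.List.pySetD g i (PySem.List.pySetD (PySem.List.pyGetD g i []) j v)

def pvCells (n : Int) : List (Int × Int) :=
  (PySem.List.pyRange 0 n 1).flatMap (fun i => (PySem.List.pyRange 0 n 1).map (fun j => (i, j)))

def pvDirs : List (Int × Int) := [(0, 1), (0, -1), (1, 0), (-1, 0)]

def pvStep (n : Int) (arr : List (List String)) (r c : Int)
    (st : List (Int × Int) × List (List Int)) (d : Int × Int) :
    List (Int × Int) × List (List Int) :=
  let nx := r + d.1
  let ny := c + d.2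
  if 0 ≤ nx ∧ nx < n ∧ 0 ≤ ny ∧ ny < n then
    if pvIdxS arr nx ny ≠ "X" then
      if pvIdxI st.2 nx ny = -1 then
        (st.1 ++ [(nx, ny)], pvSet2 st.2 nx ny (pvIdxI st.2 r c + 1))
      else st
    else st
  else st

def pvBfsLoop (fuel : Nat) (n : Int) (arr : List (List String))
    (q : List (Int × Int)) (dist : List (List Int)) : List (List Int) :=
  match fuel, q with
  | 0, _ => dist
  | _ + 1, [] => dist
  | fuel + 1, (r, c) :: qt =>
    let st := pvDirs.foldl (pvStep n arr r c) (qt, dist)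
    pvBfsLoop fuel n arr st.1 st.2

def pvBfsCore (n : Int) (arr : List (List String)) : List (List Int) :=
  let dist0 := List.replicate n.toNat (List.replicate n.toNat (-1 : Int))
  let st := (pvCells n).foldl
    (fun st ij =>
      if pvIdxS arr ij.1 ij.2 = "P" then (st.1 ++ [ij], pvSet2 st.2 ij.1 ij.2 0) else st)
    ([], dist0)
  pvBfsLoop (n.toNat * n.toNat + 1) n arr st.1 st.2

-- window agreement of the tests BFS reads

def pvBfsA (n : Int) (arr : List (List String)) : Int :=
  let dist := pvBfsCore n arr
  (pvCells n).foldl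
    (fun m ij =>
      if pvIdxS arr ij.1 ij.2 = "O" ∧ m < pvIdxI dist ij.1 ij.2 then pvIdxI dist ij.1 ij.2 else m)
    (-1)

def pvCopyB (n : Int) (board : List (List String)) (i j : Int) : List (List String) :=
  (PySem.List.pyRange 0 n 1).map (fun l1 =>
    (PySem.List.pyRange 0 n 1).map (fun l2 =>
      if l1 = i ∧ l2 = j then "B" else pvIdxS board l1 l2))

def solution (n : Int) (board : List (List String)) : Int :=
  let ans1 := (pvCells n).foldl
    (fun ans ij =>
      if pvIdxS board ij.1 ij.2 = "O" then
        let cur := pvBfsA n (pvCopyB n board ij.1 ij.2)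
        if cur ≠ -1 ∧ (ans = -1 ∨ ans > cur) then cur else ans
      else ans) (-1)
  (pvCells n).foldl
    (fun ans ij =>
      if pvIdxS board ij.1 ij.2 = "X" then
        let cur := pvBfsA n (pvCopyB n board ij.1 ij.2)
        if cur ≠ -1 ∧ (ans = -1 ∨ ans > cur) then cur else ans
      else ans) ans1


-- ===== PORT B =====
def pvRowSetB (board : List (List String)) (i j : Int) : List (List String) :=
  PySem.List.pySetD board i (PySem.List.pySetD (PySem.List.pyGetD board i []) j "B")

def pvOVals (n : Int) (board : List (List String)) (dist : List (List Int)) : List Int :=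
  (pvCells n).filterMap
    (fun ij => if pvIdxS board ij.1 ij.2 = "O" then some (pvIdxI dist ij.1 ij.2) else none)

def solution_alt (n : Int) (board : List (List String)) : Int :=
  let dist := pvBfsCore n board
  let vals := pvOVals n board dist
  let best :=
    if 2 ≤ vals.length then
      let m1 := (PySem.List.max? vals (fun x => x)).getD (-1)
      let rest := (PySem.List.remove? vals m1).getD []
      let m2 := (PySem.List.max? rest (fun x => x)).getD (-1)
      if m2 ≠ -1 then m2 else m1
    else (-1 : Int)
  (pvCells n).foldl
    (fun best ij =>
      if pvIdxS board ij.1 ij.2 = "X" then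
        let a := pvRowSetB board ij.1 ij.2
        let d := pvBfsCore n a
        let cur := (pvCells n).foldl
          (fun m rc => if pvIdxS a rc.1 rc.2 = "O" then max m (pvIdxI d rc.1 rc.2) else m) (-1)
        if cur ≠ -1 ∧ (best = -1 ∨ best > cur) then cur else best
      else best) best

-- ===== PRECONDITION & SPEC =====
-- Pre_ excludes exactly the inputs on which A raises IndexError: fewer than n rows, or one
-- of the first n rows shorter than n (A reads every cell (i,j) with i,j < n while copying).
def Pre_solution (n : Int) (board : List (List String)) : Prop :=
  n ≤ (board.length : Int) ∧ ∀ row ∈ board.take n.toNat, n ≤ (row.length : Int)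
instance (n : Int) (board : List (List String)) : Decidable (Pre_solution n board) := by
  unfold Pre_solution; infer_instance
def pvWitness_solution : Int × List (List String) :=
  (2, [["P", "X"], ["X", "O"]])
def Spec_solution (n : Int) (board : List (List String)) (out : Int) : Prop := out = solution_alt n board
instance (n : Int) (board : List (List String)) (out : Int) : Decidable (Spec_solution n board out) := by unfold Spec_solution; infer_instance

-- ===== CLAIM (what is proved, stated in full; the proofs are below) =====
def Claim_equal_solution : Prop := ∀ (n : Int) (board : List (List String)), Dom_solution n board → Pre_solution n board → Spec_solution n board (solution n board)

-- ===== LEMMAS AND PROOFS =====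
theorem mem_pvCells {n : Int} {ij : Int × Int} :
    ij ∈ pvCells n ↔ 0 ≤ ij.1 ∧ ij.1 < n ∧ 0 ≤ ij.2 ∧ ij.2 < n := by
  cases ij with
  | mk a b =>
    simp [pvCells, List.mem_flatMap, PySem.List.mem_pyRange_one]
    tauto

theorem nodup_pvCells (n : Int) : (pvCells n).Nodup := by
  have : pvCells n = (PySem.List.pyRange 0 n 1) ×ˢ (PySem.List.pyRange 0 n 1) := by
    rfl
  rw [this]
  exact List.Nodup.product (PySem.List.nodup_pyRange_one 0 n) (PySem.List.nodup_pyRange_one 0 n)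

theorem idxS_copyB {n : Int} (board : List (List String)) (i j l1 l2 : Int)
    (h1 : 0 ≤ l1) (h2 : l1 < n) (h3 : 0 ≤ l2) (h4 : l2 < n) :
    pvIdxS (pvCopyB n board i j) l1 l2 =
      if l1 = i ∧ l2 = j then "B" else pvIdxS board l1 l2 := by
  unfold pvCopyB
  rw [pvIdxS, PySem.List.pyGetD_map_pyRange_of_nonneg _ n l1 _ h1 h2,
    PySem.List.pyGetD_map_pyRange_of_nonneg _ n l2 _ h3 h4]

theorem pySetD_of_range {α : Type} (xs : List α) (i : Int) (v : α) (h0 : 0 ≤ i)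
    (h1 : i < (xs.length : Int)) : PySem.List.pySetD xs i v = xs.set i.toNat v := by
  simp [PySem.List.pySetD, PySem.List.pySet?, PySem.List.pyIdx?, h0, h1]

theorem idxS_rowSetB {n : Int} (board : List (List String)) (i j l1 l2 : Int)
    (hpre : Pre_solution n board)
    (hi1 : 0 ≤ i) (hi2 : i < n) (hj1 : 0 ≤ j) (hj2 : j < n)
    (h1 : 0 ≤ l1) (h2 : l1 < n) (h3 : 0 ≤ l2) (h4 : l2 < n) :
    pvIdxS (pvRowSetB board i j) l1 l2 =
      if l1 = i ∧ l2 = j then "B" else pvIdxS board l1 l2 := by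
  obtain ⟨hn, hrows⟩ := hpre
  have hilen : i < (board.length : Int) := lt_of_lt_of_le hi2 hn
  have hl1len : l1 < (board.length : Int) := lt_of_lt_of_le h2 hn
  have hrow : PySem.List.pyGetD board i [] = board[i.toNat]'(by omega) :=
    PySem.List.pyGetD_eq_getElem board [] hi1 (by omega)
  have hrowmem : board[i.toNat]'(by omega) ∈ board.take n.toNat := by
    have hlt : i.toNat < (board.take n.toNat).length := by
      simp [List.length_take]; omega
    have := List.getElem_mem hlt
    simpa [List.getElem_take] using this
  have hrlen : n ≤ ((board[i.toNat]'(by omega)).length : Int) := hrows _ hrowmem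
  unfold pvRowSetB
  rw [hrow, pySetD_of_range _ j _ hj1 (by omega),
      pySetD_of_range _ i _ hi1 (by omega)]
  rw [pvIdxS, pvIdxS]
  rw [PySem.List.pyGetD_eq_getElem _ _ h1 (by simpa using (by omega : l1 < (board.length : Int))),
      PySem.List.pyGetD_eq_getElem _ _ h1 (by omega)]
  rw [List.getElem_set]
  by_cases hli : l1 = i
  · subst hli
    simp only [if_true, true_and]
    rw [PySem.List.pyGetD_eq_getElem _ _ h3 (by simp; omega),
        PySem.List.pyGetD_eq_getElem _ _ h3 (by omega)]
    rw [List.getElem_set]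
    by_cases hlj : l2 = j
    · subst hlj; simp
    · have hne : ¬ (l2.toNat = j.toNat) := by omega
      simp [hlj]
      omega
  · have : ¬ (i.toNat = l1.toNat) := by omega
    simp [this, hli]

def pvAgree (n : Int) (a b : List (List String)) : Prop :=
  ∀ i j : Int, 0 ≤ i → i < n → 0 ≤ j → j < n →
    ((pvIdxS a i j = "X") ↔ (pvIdxS b i j = "X")) ∧
    ((pvIdxS a i j = "P") ↔ (pvIdxS b i j = "P"))

theorem pvStep_congr {n : Int} {a b : List (List String)} (h : pvAgree n a b)
    (r c : Int) (st : List (Int × Int) × List (List Int)) (d : Int × Int) :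
    pvStep n a r c st d = pvStep n b r c st d := by
  unfold pvStep
  by_cases hin : 0 ≤ r + d.1 ∧ r + d.1 < n ∧ 0 ≤ c + d.2 ∧ c + d.2 < n
  · obtain ⟨q1, q2, q3, q4⟩ := hin
    have hx := (h _ _ q1 q2 q3 q4).1
    simp only [if_pos (And.intro q1 (And.intro q2 (And.intro q3 q4)))]
    exact if_congr (not_congr hx) rfl rfl
  · rw [if_neg hin, if_neg hin]

theorem pvBfsLoop_congr {n : Int} {a b : List (List String)} (h : pvAgree n a b)
    (fuel : Nat) (q : List (Int × Int)) (dist : List (List Int)) :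
    pvBfsLoop fuel n a q dist = pvBfsLoop fuel n b q dist := by
  induction fuel generalizing q dist with
  | zero => rfl
  | succ fuel ih =>
    cases q with
    | nil => rfl
    | cons rc qt =>
      cases rc with
      | mk r c =>
        unfold pvBfsLoop
        have hst : pvDirs.foldl (pvStep n a r c) (qt, dist) =
            pvDirs.foldl (pvStep n b r c) (qt, dist) :=
          PySem.List.foldl_congr_mem _ _ _ _ (fun acc x _ => pvStep_congr h r c acc x)
        rw [hst, ih]

theorem pvBfsCore_congr {n : Int} {a b : List (List String)} (h : pvAgree n a b) :
    pvBfsCore n a = pvBfsCore n b := by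
  unfold pvBfsCore
  have hseed : (pvCells n).foldl
      (fun st ij =>
        if pvIdxS a ij.1 ij.2 = "P" then (st.1 ++ [ij], pvSet2 st.2 ij.1 ij.2 0) else st)
      ([], List.replicate n.toNat (List.replicate n.toNat (-1 : Int))) =
      (pvCells n).foldl
      (fun st ij =>
        if pvIdxS b ij.1 ij.2 = "P" then (st.1 ++ [ij], pvSet2 st.2 ij.1 ij.2 0) else st)
      ([], List.replicate n.toNat (List.replicate n.toNat (-1 : Int))) := by
    apply PySem.List.foldl_congr_mem
    intro acc ij hij
    obtain ⟨b1, b2, b3, b4⟩ := mem_pvCells.mp hij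
    exact if_congr ((h _ _ b1 b2 b3 b4).2) rfl rfl
  simp only []
  rw [hseed, pvBfsLoop_congr h]

def pvGridGE (g : List (List Int)) : Prop := ∀ row ∈ g, ∀ x ∈ row, (-1 : Int) ≤ x

theorem pyGetD_d_or_mem {α : Type} (xs : List α) (i : Int) (d : α) :
    PySem.List.pyGetD xs i d = d ∨ PySem.List.pyGetD xs i d ∈ xs := by
  unfold PySem.List.pyGetD
  cases h : PySem.List.pyGet? xs i with
  | none => left; rfl
  | some x => right; simpa using PySem.List.mem_of_pyGet?_eq_some xs h

theorem mem_pySetD {α : Type} {xs : List α} {i : Int} {v : α} {row : α}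
    (h : row ∈ PySem.List.pySetD xs i v) : row ∈ xs ∨ row = v := by
  unfold PySem.List.pySetD PySem.List.pySet? at h
  cases hk : PySem.List.pyIdx? xs.length i with
  | none => rw [hk] at h; simp at h; left; exact h
  | some k =>
    rw [hk] at h; simp at h
    rcases List.mem_or_eq_of_mem_set h with h1 | h1
    · left; exact h1
    · right; exact h1

theorem pvIdxI_ge {g : List (List Int)} (hg : pvGridGE g) (i j : Int) :
    (-1 : Int) ≤ pvIdxI g i j := by
  unfold pvIdxI
  rcases pyGetD_d_or_mem (PySem.List.pyGetD g i []) j (-1) with h | h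
  · omega
  · rcases pyGetD_d_or_mem g i ([] : List Int) with h2 | h2
    · rw [h2] at h; simp at h
    · exact hg _ h2 _ h

theorem pvGridGE_set2 {g : List (List Int)} (hg : pvGridGE g) {i j v : Int}
    (hv : (-1 : Int) ≤ v) : pvGridGE (pvSet2 g i j v) := by
  intro row hrow x hx
  rcases mem_pySetD hrow with h | h
  · exact hg _ h _ hx
  · subst h
    rcases mem_pySetD hx with h2 | h2
    · rcases pyGetD_d_or_mem g i ([] : List Int) with h3 | h3
      · rw [h3] at h2; simp at h2
      · exact hg _ h3 _ h2
    · omega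

theorem pvGridGE_bfsCore (n : Int) (arr : List (List String)) :
    pvGridGE (pvBfsCore n arr) := by
  unfold pvBfsCore
  simp only []
  have h0 : pvGridGE (List.replicate n.toNat (List.replicate n.toNat (-1 : Int))) := by
    intro row hrow x hx
    rw [List.eq_of_mem_replicate hrow] at hx
    rw [List.eq_of_mem_replicate hx]
  have hseed : ∀ (l : List (Int × Int)) (st : List (Int × Int) × List (List Int)),
      pvGridGE st.2 → pvGridGE (l.foldl
        (fun st ij =>
          if pvIdxS arr ij.1 ij.2 = "P" then (st.1 ++ [ij], pvSet2 st.2 ij.1 ij.2 0) else st)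
        st).2 := by
    intro l
    induction l with
    | nil => intro st h; exact h
    | cons x t ih =>
      intro st h
      simp only [List.foldl_cons]
      apply ih
      by_cases hp : pvIdxS arr x.1 x.2 = "P"
      · rw [if_pos hp]; exact pvGridGE_set2 h (by omega)
      · rw [if_neg hp]; exact h
  have hstep : ∀ (r c : Int) (l : List (Int × Int)) (st : List (Int × Int) × List (List Int)),
      pvGridGE st.2 → pvGridGE (l.foldl (pvStep n arr r c) st).2 := by
    intro r c l
    induction l with
    | nil => intro st h; exact h
    | cons x t ih =>
      intro st h
      simp only [List.foldl_cons]
      apply ih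
      unfold pvStep
      simp only []
      split_ifs with h1 h2 h3
      · exact pvGridGE_set2 h (by have := pvIdxI_ge h r c; omega)
      all_goals exact h
  have hloop : ∀ (fuel : Nat) (q : List (Int × Int)) (dist : List (List Int)),
      pvGridGE dist → pvGridGE (pvBfsLoop fuel n arr q dist) := by
    intro fuel
    induction fuel with
    | zero => intro q dist h; exact h
    | succ fuel ih =>
      intro q dist h
      cases q with
      | nil => exact h
      | cons rc qt =>
        cases rc with
        | mk r c =>
          unfold pvBfsLoop
          exact ih _ _ (hstep r c pvDirs (qt, dist) h)
  exact hloop _ _ _ (hseed (pvCells n) ([], _) h0)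

def pvMx (l : List Int) : Int := l.foldl max (-1)

def pvStp (ans c : Int) : Int := if c ≠ -1 ∧ (ans = -1 ∨ ans > c) then c else ans

theorem pvStp_neg1_left (c : Int) : pvStp (-1) c = c := by
  unfold pvStp; split_ifs with h <;> omega

theorem pvStp_rc (a b c : Int) : pvStp (pvStp a b) c = pvStp (pvStp a c) b := by
  unfold pvStp; split_ifs <;> omega

theorem foldl_stp_perm {l₁ l₂ : List Int} (h : l₁.Perm l₂) (a : Int) :
    l₁.foldl pvStp a = l₂.foldl pvStp a := by
  induction h generalizing a with
  | nil => rfl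
  | cons x _ ih => simp only [List.foldl_cons]; exact ih _
  | swap x y l =>
    simp only [List.foldl_cons]
    rw [pvStp_rc]
  | trans _ _ ih₁ ih₂ => exact (ih₁ a).trans (ih₂ a)

theorem foldl_stp_allsame {l : List Int} {c : Int} (hne : l ≠ [])
    (hall : ∀ x ∈ l, x = c) (a : Int) : l.foldl pvStp a = pvStp a c := by
  induction l generalizing a with
  | nil => exact absurd rfl hne
  | cons x t ih =>
    have hx : x = c := hall x List.mem_cons_self
    subst hx
    cases t with
    | nil => simp [List.foldl_cons]
    | cons y t' =>
      simp only [List.foldl_cons]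
      have := ih (by simp) (fun z hz => hall z (List.mem_cons_of_mem _ hz)) (pvStp a x)
      simp only [List.foldl_cons] at this
      rw [this]
      unfold pvStp; split_ifs <;> omega

theorem pvMx_ge (l : List Int) : (-1 : Int) ≤ pvMx l := (PySem.List.le_foldl_max l (-1)).1

theorem pvMx_ub {l : List Int} {x : Int} (h : x ∈ l) : x ≤ pvMx l :=
  (PySem.List.le_foldl_max l (-1)).2 x h

theorem pvMx_le {l : List Int} {b : Int} (hub : ∀ x ∈ l, x ≤ b) (hb : (-1 : Int) ≤ b) :
    pvMx l ≤ b := by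
  rcases PySem.List.foldl_max_mem l (-1) with h | h
  · rw [pvMx, h]; exact hb
  · exact hub _ h

theorem pvMx_mem {l : List Int} (hne : l ≠ []) (hge : ∀ x ∈ l, (-1 : Int) ≤ x) :
    pvMx l ∈ l := by
  rcases PySem.List.foldl_max_mem l (-1) with h | h
  · cases l with
    | nil => exact absurd rfl hne
    | cons x t =>
      have h1 : x ≤ pvMx (x :: t) := pvMx_ub List.mem_cons_self
      have h2 : (-1 : Int) ≤ x := hge x List.mem_cons_self
      rw [pvMx, h] at h1 ⊢
      have : x = -1 := by omega
      simp [this]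
  · exact h

theorem pvMx_perm {l₁ l₂ : List Int} (h : l₁.Perm l₂) : pvMx l₁ = pvMx l₂ :=
  List.Perm.foldl_op_eq h

theorem pvMx_eq_of_mem_ub {l : List Int} {b : Int} (hmem : b ∈ l) (hb : (-1 : Int) ≤ b)
    (hub : ∀ x ∈ l, x ≤ b) : pvMx l = b := by
  have h1 := pvMx_ub hmem
  have h2 := pvMx_le hub hb
  omega

theorem map_erase_perm {α : Type} [BEq α] [LawfulBEq α] {L : List α} (v : α → Int) {p : α}
    (hp : p ∈ L) : ((L.erase p).map v).Perm ((L.map v).erase (v p)) := by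
  have h1 : (L.map v).Perm (v p :: (L.erase p).map v) := by
    have := (List.perm_cons_erase hp).map v
    simpa using this
  have h2 : (L.map v).Perm (v p :: (L.map v).erase (v p)) :=
    List.perm_cons_erase (List.mem_map_of_mem hp)
  exact (h1.symm.trans h2).cons_inv

theorem pvOBranch {α : Type} [BEq α] [LawfulBEq α] (L : List α) (v : α → Int)
    (hge : ∀ p ∈ L, (-1 : Int) ≤ v p) :
    L.foldl (fun ans p => pvStp ans (pvMx ((L.erase p).map v))) (-1) =
      (if 2 ≤ L.length then
        (if pvMx ((L.map v).erase (pvMx (L.map v))) ≠ -1 then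
          pvMx ((L.map v).erase (pvMx (L.map v)))
         else pvMx (L.map v))
       else -1) := by
  by_cases hlen2 : 2 ≤ L.length
  case neg =>
    rw [if_neg hlen2]
    match L with
    | [] => rfl
    | [p] => simp [List.erase_cons_head, pvMx, pvStp]
    | p :: q :: t => simp at hlen2
  case pos =>
    rw [if_pos hlen2]
    rw [List.foldl_map (f := fun p => pvMx ((L.erase p).map v)) (g := pvStp) |>.symm]
    set vals := L.map v with hvals
    set m1 := pvMx vals with hm1
    set m2 := pvMx (vals.erase m1) with hm2
    have hgev : ∀ x ∈ vals, (-1 : Int) ≤ x := by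
      intro x hx
      rcases List.mem_map.mp hx with ⟨p, hp, rfl⟩
      exact hge p hp
    have hcur : ∀ p ∈ L, pvMx ((L.erase p).map v) = pvMx (vals.erase (v p)) :=
      fun p hp => pvMx_perm (map_erase_perm v hp)
    have hvne : vals ≠ [] := by
      have : vals.length = L.length := by rw [hvals]; exact List.length_map ..
      intro hnil; rw [hnil] at this; simp at this; omega
    have hm1mem : m1 ∈ vals := pvMx_mem hvne hgev
    have hm1ge : (-1 : Int) ≤ m1 := pvMx_ge vals
    have hub : ∀ x ∈ vals, x ≤ m1 := fun x hx => pvMx_ub hx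
    have hm2ge : (-1 : Int) ≤ m2 := pvMx_ge _
    have hm2le : m2 ≤ m1 :=
      pvMx_le (fun x hx => hub x (List.mem_of_mem_erase hx)) hm1ge
    by_cases hc : vals.count m1 = 1
    · obtain ⟨p₀, hp₀, hvp₀⟩ := List.mem_map.mp hm1mem
      have hpermL : (L.map (fun p => pvMx ((L.erase p).map v))).Perm
          ((pvMx ((L.erase p₀).map v)) :: (L.erase p₀).map (fun p => pvMx ((L.erase p).map v))) := by
        simpa using (List.perm_cons_erase hp₀).map (fun p => pvMx ((L.erase p).map v))
      rw [foldl_stp_perm hpermL]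
      simp only [List.foldl_cons, pvStp_neg1_left]
      have hpermv : vals.Perm (m1 :: (L.erase p₀).map v) := by
        have := (List.perm_cons_erase hp₀).map v
        simpa [hvp₀] using this
      have hcnt0 : ((L.erase p₀).map v).count m1 = 0 := by
        have := hpermv.count_eq m1
        simp [List.count_cons_self] at this
        omega
      have hcurp₀ : pvMx ((L.erase p₀).map v) = m2 := by
        rw [hcur p₀ hp₀, hvp₀]
      have hrest : ∀ x ∈ (L.erase p₀).map (fun p => pvMx ((L.erase p).map v)), x = m1 := by
        intro x hx
        rcases List.mem_map.mp hx with ⟨q, hq, rfl⟩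
        have hqL : q ∈ L := List.mem_of_mem_erase hq
        have hvqne : v q ≠ m1 := by
          intro heq
          have : v q ∈ (L.erase p₀).map v := List.mem_map_of_mem hq
          rw [heq] at this
          exact (List.count_eq_zero.mp hcnt0) this
        have hm1in : m1 ∈ vals.erase (v q) :=
          (List.mem_erase_of_ne (fun h => hvqne h.symm)).mpr hm1mem
        rw [hcur q hqL]
        exact pvMx_eq_of_mem_ub hm1in hm1ge (fun x hx => hub x (List.mem_of_mem_erase hx))
      have hrestne : (L.erase p₀).map (fun p => pvMx ((L.erase p).map v)) ≠ [] := by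
        have hl := List.length_erase_of_mem hp₀
        intro hnil
        have hthis := congrArg List.length hnil
        simp only [List.length_map, List.length_nil] at hthis
        omega
      rw [foldl_stp_allsame hrestne hrest, hcurp₀]
      unfold pvStp
      split_ifs <;> omega
    · have hcge : 0 < vals.count m1 := List.count_pos_iff.mpr hm1mem
      have hm1erase : m1 ∈ vals.erase m1 := by
        have hce := List.count_erase_self (a := m1) (l := vals)
        apply List.count_pos_iff.mp
        rw [hce]
        omega
      have hm2eq : m2 = m1 :=
        pvMx_eq_of_mem_ub hm1erase hm1ge (fun x hx => hub x (List.mem_of_mem_erase hx))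
      have hall : ∀ x ∈ L.map (fun p => pvMx ((L.erase p).map v)), x = m1 := by
        intro x hx
        rcases List.mem_map.mp hx with ⟨q, hq, rfl⟩
        rw [hcur q hq]
        by_cases hvq : v q = m1
        · rw [hvq]
          exact hm2eq
        · have hm1in : m1 ∈ vals.erase (v q) :=
            (List.mem_erase_of_ne (fun h => hvq h.symm)).mpr hm1mem
          exact pvMx_eq_of_mem_ub hm1in hm1ge (fun x hx => hub x (List.mem_of_mem_erase hx))
      have hLne : L.map (fun p => pvMx ((L.erase p).map v)) ≠ [] := by
        intro hnil
        have hthis := congrArg List.length hnil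
        simp only [List.length_map, List.length_nil] at hthis
        omega
      rw [foldl_stp_allsame hLne hall, pvStp_neg1_left, hm2eq]
      split_ifs <;> rfl

theorem pvFilterMap_if {α : Type} (l : List α) (P : α → Prop) [DecidablePred P] (f : α → Int) :
    l.filterMap (fun x => if P x then some (f x) else none) =
      (l.filter (fun x => decide (P x))).map f := by
  induction l with
  | nil => rfl
  | cons x t ih => by_cases hp : P x <;> simp [hp, ih]

-- the distance grid of a board with one 'O' replaced by 'B' is the original distance grid

theorem pvCore_copyB_O {n : Int} (board : List (List String)) {i j : Int}
    (hi : 0 ≤ i) (hi2 : i < n) (hj : 0 ≤ j) (hj2 : j < n)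
    (hO : pvIdxS board i j = "O") :
    pvBfsCore n (pvCopyB n board i j) = pvBfsCore n board := by
  apply pvBfsCore_congr
  intro a b ha1 ha2 hb1 hb2
  rw [idxS_copyB board i j a b ha1 ha2 hb1 hb2]
  by_cases hab : a = i ∧ b = j
  · obtain ⟨rfl, rfl⟩ := hab
    rw [if_pos ⟨rfl, rfl⟩, hO]
    constructor <;> constructor <;> intro h <;> simp_all
  · rw [if_neg hab]
    exact ⟨Iff.rfl, Iff.rfl⟩

-- A's bfs on the O-removed board = running max over the other O cells of the base distances

theorem pvBfsA_copyB_O {n : Int} (board : List (List String)) {i j : Int}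
    (hi : 0 ≤ i) (hi2 : i < n) (hj : 0 ≤ j) (hj2 : j < n)
    (hO : pvIdxS board i j = "O") :
    pvBfsA n (pvCopyB n board i j) =
      pvMx (((((pvCells n).filter
          (fun kl => decide (pvIdxS board kl.1 kl.2 = "O"))).erase (i, j)).map
          (fun kl => pvIdxI (pvBfsCore n board) kl.1 kl.2))) := by
  unfold pvBfsA
  simp only []
  rw [pvCore_copyB_O board hi hi2 hj hj2 hO]
  have hcongr : (pvCells n).foldl
      (fun m ij => if pvIdxS (pvCopyB n board i j) ij.1 ij.2 = "O" ∧
          m < pvIdxI (pvBfsCore n board) ij.1 ij.2 then pvIdxI (pvBfsCore n board) ij.1 ij.2 else m)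
      (-1) =
      (pvCells n).foldl
      (fun m ij => if (pvIdxS board ij.1 ij.2 = "O" ∧ ¬ ij = (i, j)) then
          (if m < pvIdxI (pvBfsCore n board) ij.1 ij.2 then pvIdxI (pvBfsCore n board) ij.1 ij.2 else m) else m)
      (-1) := by
    apply PySem.List.foldl_congr_mem
    intro acc kl hkl
    obtain ⟨b1, b2, b3, b4⟩ := mem_pvCells.mp hkl
    rw [idxS_copyB board i j kl.1 kl.2 b1 b2 b3 b4]
    by_cases hab : kl.1 = i ∧ kl.2 = j
    · have hkleq : kl = (i, j) := Prod.ext hab.1 hab.2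
      rw [if_pos hab]
      rw [if_neg (by simp), if_neg (by simp [hkleq])]
    · have hklne : ¬ kl = (i, j) := fun h => hab ⟨by rw [h], by rw [h]⟩
      rw [if_neg hab]
      by_cases hP : pvIdxS board kl.1 kl.2 = "O"
      · by_cases hm : acc < pvIdxI (pvBfsCore n board) kl.1 kl.2
        · rw [if_pos ⟨hP, hm⟩, if_pos ⟨hP, hklne⟩, if_pos hm]
        · rw [if_neg (fun h => hm h.2), if_pos ⟨hP, hklne⟩, if_neg hm]
      · rw [if_neg (fun h => hP h.1), if_neg (fun h => hP h.1)]
  rw [hcongr]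
  rw [PySem.List.foldl_ite_eq_foldl_filter
    (p := fun kl => pvIdxS board kl.1 kl.2 = "O" ∧ ¬ kl = (i, j))
    (f := fun m kl => if m < pvIdxI (pvBfsCore n board) kl.1 kl.2 then pvIdxI (pvBfsCore n board) kl.1 kl.2 else m)]
  have hfsplit : (pvCells n).filter (fun kl => decide (pvIdxS board kl.1 kl.2 = "O" ∧ ¬ kl = (i, j))) =
      (((pvCells n).filter (fun kl => decide (pvIdxS board kl.1 kl.2 = "O"))).erase (i, j)) := by
    rw [List.Nodup.erase_eq_filter (List.Nodup.filter _ (nodup_pvCells n)) (i, j)]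
    rw [List.filter_filter]
    apply List.filter_congr
    intro kl _
    by_cases h1 : pvIdxS board kl.1 kl.2 = "O" <;> by_cases h2 : kl = (i, j) <;> simp [h1, h2]
  rw [hfsplit]
  have hmax : ∀ (l : List (Int × Int)) (a : Int),
      l.foldl (fun m kl => if m < pvIdxI (pvBfsCore n board) kl.1 kl.2 then pvIdxI (pvBfsCore n board) kl.1 kl.2 else m) a =
      (l.map (fun kl => pvIdxI (pvBfsCore n board) kl.1 kl.2)).foldl max a := by
    intro l a
    rw [List.foldl_map]
    apply PySem.List.foldl_congr_mem
    intro acc kl _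
    by_cases hm : acc < pvIdxI (pvBfsCore n board) kl.1 kl.2
    · rw [if_pos hm, max_eq_right (le_of_lt hm)]
    · rw [if_neg hm, max_eq_left (by omega)]
  rw [hmax]
  rfl

-- A's per-wall candidate equals B's per-wall candidate

theorem pvXcell {n : Int} (board : List (List String)) {i j : Int}
    (hpre : Pre_solution n board)
    (hi : 0 ≤ i) (hi2 : i < n) (hj : 0 ≤ j) (hj2 : j < n) :
    pvBfsA n (pvCopyB n board i j) =
      (pvCells n).foldl
        (fun m rc => if pvIdxS (pvRowSetB board i j) rc.1 rc.2 = "O" then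
            max m (pvIdxI (pvBfsCore n (pvRowSetB board i j)) rc.1 rc.2) else m)
        (-1) := by
  have heq : ∀ a b : Int, 0 ≤ a → a < n → 0 ≤ b → b < n →
      pvIdxS (pvCopyB n board i j) a b = pvIdxS (pvRowSetB board i j) a b := by
    intro a b h1 h2 h3 h4
    rw [idxS_copyB board i j a b h1 h2 h3 h4,
        idxS_rowSetB board i j a b hpre hi hi2 hj hj2 h1 h2 h3 h4]
  have hcore : pvBfsCore n (pvCopyB n board i j) = pvBfsCore n (pvRowSetB board i j) := by
    apply pvBfsCore_congr
    intro a b h1 h2 h3 h4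
    rw [heq a b h1 h2 h3 h4]
    exact ⟨Iff.rfl, Iff.rfl⟩
  unfold pvBfsA
  simp only []
  rw [hcore]
  apply PySem.List.foldl_congr_mem
  intro acc rc hrc
  obtain ⟨b1, b2, b3, b4⟩ := mem_pvCells.mp hrc
  rw [heq rc.1 rc.2 b1 b2 b3 b4]
  by_cases hP : pvIdxS (pvRowSetB board i j) rc.1 rc.2 = "O"
  · by_cases hm : acc < pvIdxI (pvBfsCore n (pvRowSetB board i j)) rc.1 rc.2
    · rw [if_pos ⟨hP, hm⟩, if_pos hP, max_eq_right (le_of_lt hm)]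
    · rw [if_neg (fun h => hm h.2), if_pos hP, max_eq_left (by omega)]
  · rw [if_neg (fun h => hP h.1), if_neg hP]

-- Python's max(xs) (no key) is the running max when entries are ≥ -1

theorem pvPyMax {l : List Int} (hne : l ≠ []) (hge : ∀ x ∈ l, (-1 : Int) ≤ x) :
    (PySem.List.max? l (fun x => x)).getD (-1) = pvMx l := by
  cases l with
  | nil => exact absurd rfl hne
  | cons x t =>
    rw [PySem.List.max?_id_cons]
    have hx : (-1 : Int) ≤ x := hge x List.mem_cons_self
    simp only [Option.getD_some, pvMx, List.foldl_cons]
    rw [max_eq_right hx]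

theorem pvObranch_eq (n : Int) (board : List (List String)) :
    (pvCells n).foldl
      (fun ans ij =>
        if pvIdxS board ij.1 ij.2 = "O" then
          let cur := pvBfsA n (pvCopyB n board ij.1 ij.2)
          if cur ≠ -1 ∧ (ans = -1 ∨ ans > cur) then cur else ans
        else ans) (-1) =
    (if 2 ≤ (pvOVals n board (pvBfsCore n board)).length then
      let m1 := (PySem.List.max? (pvOVals n board (pvBfsCore n board)) (fun x => x)).getD (-1)
      let rest := (PySem.List.remove? (pvOVals n board (pvBfsCore n board)) m1).getD []
      let m2 := (PySem.List.max? rest (fun x => x)).getD (-1)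
      if m2 ≠ -1 then m2 else m1
    else (-1 : Int)) := by
  have hgrid := pvGridGE_bfsCore n board
  have h1 : (pvCells n).foldl
      (fun ans ij =>
        if pvIdxS board ij.1 ij.2 = "O" then
          let cur := pvBfsA n (pvCopyB n board ij.1 ij.2)
          if cur ≠ -1 ∧ (ans = -1 ∨ ans > cur) then cur else ans
        else ans) (-1) =
      (pvCells n).foldl
      (fun ans ij =>
        if pvIdxS board ij.1 ij.2 = "O" then
          pvStp ans (pvBfsA n (pvCopyB n board ij.1 ij.2))
        else ans) (-1) := rfl
  rw [h1]
  rw [PySem.List.foldl_ite_eq_foldl_filter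
    (p := fun ij : Int × Int => pvIdxS board ij.1 ij.2 = "O")
    (f := fun ans ij => pvStp ans (pvBfsA n (pvCopyB n board ij.1 ij.2)))]
  have h2 : ((pvCells n).filter
        (fun kl => decide (pvIdxS board kl.1 kl.2 = "O"))).foldl
      (fun ans ij => pvStp ans (pvBfsA n (pvCopyB n board ij.1 ij.2))) (-1) =
      ((pvCells n).filter
        (fun kl => decide (pvIdxS board kl.1 kl.2 = "O"))).foldl
      (fun ans ij => pvStp ans (pvMx (((((pvCells n).filter
          (fun kl => decide (pvIdxS board kl.1 kl.2 = "O"))).erase ij).map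
          (fun kl => pvIdxI (pvBfsCore n board) kl.1 kl.2))))) (-1) := by
    apply PySem.List.foldl_congr_mem
    intro acc ij hij
    have hijC := List.mem_of_mem_filter hij
    have hO : pvIdxS board ij.1 ij.2 = "O" := by
      have := List.of_mem_filter hij
      simpa using this
    obtain ⟨b1, b2, b3, b4⟩ := mem_pvCells.mp hijC
    have := pvBfsA_copyB_O board b1 b2 b3 b4 hO
    rw [this, Prod.mk.eta]
  rw [h2]
  rw [pvOBranch ((pvCells n).filter (fun kl => decide (pvIdxS board kl.1 kl.2 = "O")))
    (fun kl => pvIdxI (pvBfsCore n board) kl.1 kl.2)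
    (fun p _ => pvIdxI_ge hgrid p.1 p.2)]
  have hvals : pvOVals n board (pvBfsCore n board) =
      ((pvCells n).filter (fun kl => decide (pvIdxS board kl.1 kl.2 = "O"))).map
        (fun kl => pvIdxI (pvBfsCore n board) kl.1 kl.2) :=
    pvFilterMap_if (pvCells n) (fun ij => pvIdxS board ij.1 ij.2 = "O")
      (fun kl => pvIdxI (pvBfsCore n board) kl.1 kl.2)
  rw [hvals]
  set L := (pvCells n).filter (fun kl => decide (pvIdxS board kl.1 kl.2 = "O")) with hLdef
  set v : Int × Int → Int := fun kl => pvIdxI (pvBfsCore n board) kl.1 kl.2 with hvdef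
  have hgev : ∀ x ∈ L.map v, (-1 : Int) ≤ x := by
    intro x hx
    rcases List.mem_map.mp hx with ⟨p, _, rfl⟩
    exact pvIdxI_ge hgrid p.1 p.2
  have hlenmap : (L.map v).length = L.length := List.length_map ..
  by_cases hlen : 2 ≤ L.length
  · rw [if_pos hlen, if_pos (show 2 ≤ (List.map v L).length by rw [hlenmap]; exact hlen)]
    have hvne : L.map v ≠ [] := by
      intro hnil
      have := congrArg List.length hnil
      simp only [List.length_nil] at this
      omega
    have hm1 : (PySem.List.max? (L.map v) (fun x => x)).getD (-1) = pvMx (L.map v) :=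
      pvPyMax hvne hgev
    have hm1mem : pvMx (L.map v) ∈ L.map v := pvMx_mem hvne hgev
    have hrest : PySem.List.remove? (L.map v) (pvMx (L.map v)) =
        some ((L.map v).erase (pvMx (L.map v))) :=
      PySem.List.remove?_eq_some_erase (L.map v) _ hm1mem
    have herasene : (L.map v).erase (pvMx (L.map v)) ≠ [] := by
      have hle := List.length_erase_of_mem hm1mem
      intro hnil
      have := congrArg List.length hnil
      simp only [List.length_nil] at this
      omega
    have hm2 : (PySem.List.max? ((L.map v).erase (pvMx (L.map v))) (fun x => x)).getD (-1) =
        pvMx ((L.map v).erase (pvMx (L.map v))) :=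
      pvPyMax herasene (fun x hx => hgev x (List.mem_of_mem_erase hx))
    simp only [hm1, hrest, Option.getD_some, hm2]
  · rw [if_neg hlen, if_neg (show ¬ 2 ≤ (List.map v L).length by rw [hlenmap]; exact hlen)]

theorem solution_main (n : Int) (board : List (List String)) (hpre : Pre_solution n board) :
    solution n board = solution_alt n board := by
  unfold solution solution_alt
  simp only []
  rw [← pvObranch_eq n board]
  apply PySem.List.foldl_congr_mem
  intro acc ij hij
  obtain ⟨b1, b2, b3, b4⟩ := mem_pvCells.mp hij
  by_cases hX : pvIdxS board ij.1 ij.2 = "X"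
  · rw [if_pos hX, if_pos hX]
    rw [pvXcell board hpre b1 b2 b3 b4]
  · rw [if_neg hX, if_neg hX]

-- ===== VERDICT (by name: the statement is the Claim_ definition above) =====
theorem solution_spec : Claim_equal_solution := by
  intro n board _ hpre
  exact solution_main n board hpre
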